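-- pv_equiv track=rewrite | github.com/PlanetWyh/Medi_Vizz | disease_trajectory_type1_v2.py | group_year_codes
-- ===== SOURCE A (Python) =====
-- def group_year_codes(df_codes_years):
--     grouped_codes_years={}
--     for date, code in df_codes_years:
--         if date in grouped_codes_years:
--             grouped_codes_years[date].append(code)
--         else:
--             value=[]
--             grouped_codes_years.setdefault(date, value)
--             grouped_codes_years[date].append(code)
--     return grouped_codes_years
-- ===== SOURCE B (Python) =====
-- def group_year_codes(df_codes_years):
--     dates = dict.fromkeys(d for d, _ in df_codes_years)
--     return {d: [c for dd, c in df_codes_years if dd == d] for d in dates}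
-- ===== Notes on version B (the rewrite author's own statement) =====
-- stated objective: simpler
-- what changed: Replaces the single stateful grouping loop over a mutable dict with two declarative passes: an ordered key dedup (dict.fromkeys) followed by a per-key filter comprehension.
import Mathlib
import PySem

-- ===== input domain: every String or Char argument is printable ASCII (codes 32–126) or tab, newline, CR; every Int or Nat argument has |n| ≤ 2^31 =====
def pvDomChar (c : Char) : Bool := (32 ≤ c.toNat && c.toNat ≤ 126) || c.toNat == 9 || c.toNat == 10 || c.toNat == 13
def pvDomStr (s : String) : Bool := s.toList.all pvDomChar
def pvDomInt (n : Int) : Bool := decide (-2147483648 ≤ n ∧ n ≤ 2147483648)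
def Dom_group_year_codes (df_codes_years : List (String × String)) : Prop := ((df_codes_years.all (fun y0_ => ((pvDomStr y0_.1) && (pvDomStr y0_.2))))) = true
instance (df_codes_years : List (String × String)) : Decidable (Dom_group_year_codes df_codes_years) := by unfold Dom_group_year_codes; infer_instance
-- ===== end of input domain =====

-- B is a simpler two-pass decomposition (ordered key dedup, then per-key filter);
-- equivalence is about the returned dict rendered as its insertion-ordered items list.

-- ===== PORT A =====
-- one loop iteration of A: the membership test, setdefault and append, step for step
def groupStepA (g : PySem.Dict String (List String)) (p : String × String) :
    PySem.Dict String (List String) :=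
  if g.contains p.1 then
    g.modify p.1 [] (fun l => l ++ [p.2])            -- grouped[date].append(code)
  else
    (g.setdefault p.1 []).modify p.1 [] (fun l => l ++ [p.2])

def group_year_codes (df_codes_years : List (String × String)) : List (String × List String) :=
  (df_codes_years.foldl groupStepA PySem.Dict.empty).items

-- ===== PORT B =====
def group_year_codes_alt (df_codes_years : List (String × String)) : List (String × List String) :=
  (PySem.List.dedup (df_codes_years.map Prod.fst)).map
    (fun d => (d, (df_codes_years.filter (fun p => p.1 == d)).map Prod.snd))

-- ===== PRECONDITION & SPEC =====
def Spec_group_year_codes (df_codes_years : List (String × String)) (out : List (String × List String)) : Prop := out = group_year_codes_alt df_codes_years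
instance (df_codes_years : List (String × String)) (out : List (String × List String)) : Decidable (Spec_group_year_codes df_codes_years out) := by unfold Spec_group_year_codes; infer_instance

-- ===== CLAIM (what is proved, stated in full; the proofs are below) =====
def Claim_equal_group_year_codes : Prop := ∀ (df_codes_years : List (String × String)), Dom_group_year_codes df_codes_years → Spec_group_year_codes df_codes_years (group_year_codes df_codes_years)

-- ===== LEMMAS AND PROOFS =====

-- A's branching step is pointwise the plain 'modify with append' step
theorem groupStepA_eq_modify (g : PySem.Dict String (List String)) (p : String × String) :
    groupStepA g p = g.modify p.1 [] (fun l => l ++ [p.2]) := by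
  unfold groupStepA
  by_cases h : g.contains p.1
  · simp [h]
  · have h' : g.contains p.1 = false := by simpa using h
    rw [if_neg (by simp [h']), PySem.Dict.setdefault_of_not_contains g ([] : List String) h']
    simp [PySem.Dict.modify, PySem.Dict.insert_insert_self, PySem.Dict.getD_insert_self,
      PySem.Dict.getD_of_not_contains g ([] : List String) h']

theorem foldl_groupStepA (xs : List (String × String)) (g : PySem.Dict String (List String)) :
    xs.foldl groupStepA g = xs.foldl (fun d q => d.modify q.1 [] (fun l => l ++ [q.2])) g := by
  induction xs generalizing g with
  | nil => rfl
  | cons p xs ih => simp [List.foldl_cons, groupStepA_eq_modify, ih]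

-- ===== VERDICT (by name: the statement is the Claim_ definition above) =====
theorem group_year_codes_spec : Claim_equal_group_year_codes := by
  intro xs _
  show group_year_codes xs = group_year_codes_alt xs
  unfold group_year_codes group_year_codes_alt
  rw [foldl_groupStepA]
  have hnd : (xs.foldl (fun d q => d.modify q.1 [] (fun l => l ++ [q.2])) PySem.Dict.empty).keys.Nodup :=
    PySem.Dict.nodup_keys_foldl_modify_key xs Prod.fst [] (fun _ q l => l ++ [q.2])
      PySem.Dict.empty (by simp [PySem.Dict.keys_empty])
  rw [PySem.Dict.items_eq_map_keys _ hnd []]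
  have hkeys : (xs.foldl (fun d q => d.modify q.1 [] (fun l => l ++ [q.2])) PySem.Dict.empty).keys
      = PySem.List.dedup (xs.map Prod.fst) := by
    rw [PySem.Dict.keys_foldl_modify_key xs Prod.fst [] (fun _ q l => l ++ [q.2])]
    simp [PySem.Dict.keys_empty, PySem.Set.update_nil_left]
  rw [hkeys]
  refine List.map_congr_left (fun d _ => ?_)
  rw [PySem.Dict.getD_foldl_modify_append]
  simp [PySem.Dict.getD_empty]
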